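-- pv_equiv track=rewrite | github.com/repairman29/chump | scripts/ab-harness/cross-agent-adapter.py | _extract_last_aider_block
-- ===== SOURCE A (Python) =====
-- def _extract_last_aider_block(text: str) -> str:
--     """Extract the last assistant response from aider's stdout."""
--     # Aider outputs lines like "assistant> <text>" or just the response text.
--     # Look for lines after the last "aider>" prompt marker.
--     lines = text.splitlines()
--     # Find the last occurrence of a line starting with "aider>" or an arrow marker.
--     last_marker = -1
--     for i, line in enumerate(lines):
--         if line.strip().startswith("aider>") or line.strip().startswith(">"):
--             last_marker = i
--     if last_marker == -1:
--         return text
--     response_lines = lines[last_marker + 1:]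
--     # Strip any trailing prompt artifacts.
--     return "\n".join(
--         line for line in response_lines
--         if not line.strip().startswith("aider>")
--     ).strip()
-- ===== SOURCE B (Python) =====
-- def _extract_last_aider_block(text: str) -> str:
--     """Extract the last assistant response from aider's stdout."""
--     # Single pass: reset the accumulator whenever a prompt marker is seen.
--     current = []
--     seen = False
--     for line in text.splitlines():
--         s = line.strip()
--         if s.startswith("aider>") or s.startswith(">"):
--             seen = True
--             current = []
--         else:
--             current.append(line)
--     if not seen:
--         return text
--     return "\n".join(current).strip()
-- ===== Notes on version B (the rewrite author's own statement) =====
-- stated objective: simpler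
-- what changed: Replaces the last-marker index search plus slice plus (dead) re-filter of 'aider>' lines with a single pass keeping a resettable accumulator of lines since the most recent marker.
import Mathlib
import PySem

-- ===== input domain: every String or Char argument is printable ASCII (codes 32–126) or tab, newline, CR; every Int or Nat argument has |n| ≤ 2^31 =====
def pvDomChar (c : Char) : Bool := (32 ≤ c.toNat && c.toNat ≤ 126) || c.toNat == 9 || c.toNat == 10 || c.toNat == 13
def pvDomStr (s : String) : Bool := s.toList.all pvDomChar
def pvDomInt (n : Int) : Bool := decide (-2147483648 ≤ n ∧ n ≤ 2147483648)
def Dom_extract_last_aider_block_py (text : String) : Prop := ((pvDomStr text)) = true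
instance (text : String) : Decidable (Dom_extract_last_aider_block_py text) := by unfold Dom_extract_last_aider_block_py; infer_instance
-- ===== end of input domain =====

-- B replaces A's last-marker index search + slice + (dead) re-filter with one pass
-- keeping a resettable accumulator of the lines since the most recent marker (objective: simpler).

-- ===== PORT A =====
def extract_last_aider_block_py (text : String) : String :=
  let lines := PySem.Str.splitlines text
  let last_marker : Int :=
    (PySem.List.enumerate lines).foldl (fun acc p =>
      if PySem.Str.startswith (PySem.Str.strip p.2) "aider>" ||
         PySem.Str.startswith (PySem.Str.strip p.2) ">" then p.1 else acc) (-1)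
  if last_marker = -1 then text
  else
    let response_lines := PySem.List.slice lines (some (last_marker + 1)) none
    PySem.Str.strip (PySem.Str.join "\n"
      (response_lines.filter (fun line =>
        !(PySem.Str.startswith (PySem.Str.strip line) "aider>"))))

-- ===== PORT B =====
def extract_last_aider_block_py_alt (text : String) : String :=
  let st := (PySem.Str.splitlines text).foldl
    (fun (st : List String × Bool) line =>
      let s := PySem.Str.strip line
      if PySem.Str.startswith s "aider>" || PySem.Str.startswith s ">" then ([], true)
      else (st.1 ++ [line], st.2)) ([], false)
  if st.2 then PySem.Str.strip (PySem.Str.join "\n" st.1) else text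

-- ===== PRECONDITION & SPEC =====
def Spec_extract_last_aider_block_py (text : String) (out : String) : Prop := out = extract_last_aider_block_py_alt text
instance (text : String) (out : String) : Decidable (Spec_extract_last_aider_block_py text out) := by unfold Spec_extract_last_aider_block_py; infer_instance

-- ===== CLAIM (what is proved, stated in full; the proofs are below) =====
def Claim_equal_extract_last_aider_block_py : Prop := ∀ (text : String), Dom_extract_last_aider_block_py text → Spec_extract_last_aider_block_py text (extract_last_aider_block_py text)

-- ===== LEMMAS AND PROOFS =====

-- the shared marker test (proof-side abbreviation; both ports write it inline)
def pvMark (line : String) : Bool :=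
  PySem.Str.startswith (PySem.Str.strip line) "aider>" ||
  PySem.Str.startswith (PySem.Str.strip line) ">"

def pvAfold (ls : List String) : Int :=
  (PySem.List.enumerate ls).foldl (fun acc p => if pvMark p.2 then p.1 else acc) (-1)

def pvBfold (ls : List String) : List String × Bool :=
  ls.foldl (fun st line => if pvMark line then ([], true) else (st.1 ++ [line], st.2)) ([], false)

-- the invariant relating A's last-marker fold to B's resettable accumulator
lemma pv_rel (ls : List String) :
    ((pvBfold ls).2 = false ∧ pvAfold ls = -1 ∧ (pvBfold ls).1 = ls) ∨
    (∃ k : Nat, (pvBfold ls).2 = true ∧ pvAfold ls = (k : Int) ∧ k < ls.length ∧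
      (pvBfold ls).1 = ls.drop (k + 1) ∧ ∀ l ∈ (pvBfold ls).1, pvMark l = false) := by
  induction ls using List.reverseRecOn with
  | nil => left; simp [pvBfold, pvAfold, PySem.List.enumerate]
  | append_singleton ls l ih =>
    have hb : pvBfold (ls ++ [l]) =
        (if pvMark l then ([], true) else ((pvBfold ls).1 ++ [l], (pvBfold ls).2)) := by
      simp [pvBfold, List.foldl_append]
    have ha : pvAfold (ls ++ [l]) = (if pvMark l then (ls.length : Int) else pvAfold ls) := by
      simp [pvAfold, PySem.List.enumerate_append, List.foldl_append,
        PySem.List.enumerate_cons, PySem.List.enumerate_nil]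
    by_cases hm : pvMark l
    · right
      refine ⟨ls.length, ?_, ?_, ?_, ?_, ?_⟩ <;> simp [hb, ha, hm]
    · rcases ih with ⟨h2, h1, hc⟩ | ⟨k, h2, h1, hk, hc, hall⟩
      · left
        refine ⟨?_, ?_, ?_⟩ <;> simp [hb, ha, hm, h1, h2, hc]
      · right
        refine ⟨k, ?_, ?_, ?_, ?_, ?_⟩
        · simp [hb, hm, h2]
        · simp [ha, hm, h1]
        · simp; omega
        · have : ls.drop (k + 1) ++ [l] = (ls ++ [l]).drop (k + 1) := by
            rw [List.drop_append_of_le_length (by omega)]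
          simp [hb, hm, hc, this]
        · intro x hx
          simp [hb, hm] at hx
          rcases hx with hx | hx
          · exact hall x hx
          · subst hx; exact eq_false_of_ne_true hm

lemma pv_main (ls : List String) (text : String) :
    (if pvAfold ls = -1 then text
     else PySem.Str.strip (PySem.Str.join "\n"
       ((PySem.List.slice ls (some (pvAfold ls + 1)) none).filter
         (fun line => !(PySem.Str.startswith (PySem.Str.strip line) "aider>"))))) =
    (if (pvBfold ls).2 then PySem.Str.strip (PySem.Str.join "\n" (pvBfold ls).1) else text) := by
  rcases pv_rel ls with ⟨h2, h1, _⟩ | ⟨k, h2, h1, _, hc, hall⟩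
  · simp [h1, h2]
  · have hne : pvAfold ls ≠ -1 := by rw [h1]; omega
    rw [if_neg hne, h2, if_pos rfl]
    have hcast : pvAfold ls + 1 = ((k + 1 : Nat) : Int) := by rw [h1]; push_cast; ring
    rw [hcast, PySem.List.slice_from_natCast, ← hc]
    congr 1
    congr 1
    apply List.filter_eq_self.mpr
    intro a ha
    have := hall a ha
    simp [pvMark] at this
    simp [this.1]

-- ===== VERDICT (by name: the statement is the Claim_ definition above) =====
theorem extract_last_aider_block_py_spec : Claim_equal_extract_last_aider_block_py := by
  intro text _
  unfold Spec_extract_last_aider_block_py extract_last_aider_block_py extract_last_aider_block_py_alt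
  have := pv_main (PySem.Str.splitlines text) text
  simpa [pvAfold, pvBfold, pvMark] using this
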